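-- pv_equiv track=rewrite | github.com/Kevin-Jiguet/UMD_clear | UMD_final_uncommented/speciation_and_angles.py | analysis_subtab
-- ===== SOURCE A (Python) =====
-- def analysis_subtab(Clusters,Step):#Creates a dictionnary whose keys are the individual clusters, and the values are a list of list of their *consecutive* steps of existence.
--         population={}
--         for Snapshot in Clusters :
--             for cluster in Snapshot :
--                 if str(cluster) in population.keys():
--                     if population[str(cluster)][-1][-1]==Step-1:
--                         population[str(cluster)][-1].append(Step)
--                     else :
--                         population[str(cluster)].append([Step])
--                 else :
--                     population[str(cluster)]=[[Step]]
--             Step+=1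
--         return population
-- ===== SOURCE B (Python) =====
-- def _runs(xs):
--     # segment an ordered step list into maximal runs; equal or non-adjacent
--     # neighbours (same-snapshot duplicates) start a new singleton run
--     out = []
--     for x in xs:
--         if out and out[-1][-1] == x - 1:
--             out[-1].append(x)
--         else:
--             out.append([x])
--     return out
--
-- def analysis_subtab(Clusters, Step):
--     # pass 1: collect every step of occurrence per cluster, in arrival order
--     steps = {}
--     s = Step
--     for Snapshot in Clusters:
--         for cluster in Snapshot:
--             steps.setdefault(str(cluster), []).append(s)
--         s += 1
--     # pass 2: segment each step list into consecutive runs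
--     return {k: _runs(v) for k, v in steps.items()}
-- ===== Notes on version B (the rewrite author's own statement) =====
-- stated objective: alternative
-- what changed: Replaces A's fused scan that maintains run-lists incrementally inside the dict (a key lookup plus last-run inspection per occurrence) with a two-pass decomposition: first collect each cluster's flat step list, then segment each list into consecutive runs.
import Mathlib
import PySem

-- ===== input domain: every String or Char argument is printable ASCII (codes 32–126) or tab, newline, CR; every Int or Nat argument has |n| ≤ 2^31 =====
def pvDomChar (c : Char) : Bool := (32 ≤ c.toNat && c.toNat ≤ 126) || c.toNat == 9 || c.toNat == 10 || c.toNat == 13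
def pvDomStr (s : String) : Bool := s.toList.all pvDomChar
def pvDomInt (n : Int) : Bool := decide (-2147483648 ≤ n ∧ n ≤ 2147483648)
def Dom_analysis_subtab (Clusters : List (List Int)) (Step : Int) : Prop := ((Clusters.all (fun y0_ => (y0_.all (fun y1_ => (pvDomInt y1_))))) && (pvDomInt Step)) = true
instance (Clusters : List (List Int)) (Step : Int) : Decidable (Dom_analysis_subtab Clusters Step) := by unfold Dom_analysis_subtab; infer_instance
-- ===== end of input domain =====

-- B replaces A's fused scan (runs maintained incrementally inside the dict) with a
-- two-pass decomposition: collect each cluster's step list, then segment it into runs.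


-- ===== PORT A =====
-- dict as association list (insertion order): overwrite in place, new keys append
def pvSetKey {V : Type} (d : List (String × V)) (k : String) (v : V) : List (String × V) :=
  match d with
  | [] => [(k, v)]
  | (k', v') :: rest => if k' = k then (k, v) :: rest else (k', v') :: pvSetKey rest k v

-- one cluster of A's inner loop (xs[-1] is getLast?; none = IndexError, unreachable:
-- A's dict values are always nonempty lists of nonempty runs)
def pvStepA (pop : List (String × List (List Int))) (s : Int) (cluster : Int) :
    List (String × List (List Int)) :=
  match pop.lookup (PySem.Int.toStr cluster) with
  | some v =>
    match v.getLast? with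
    | some r =>
      match r.getLast? with
      | some lastlast =>
        if lastlast = s - 1 then
          pvSetKey pop (PySem.Int.toStr cluster) (v.dropLast ++ [r ++ [s]])   -- population[key][-1].append(Step)
        else
          pvSetKey pop (PySem.Int.toStr cluster) (v ++ [[s]])                 -- population[key].append([Step])
      | none => pvSetKey pop (PySem.Int.toStr cluster) (v ++ [[s]])           -- unreachable
    | none => pvSetKey pop (PySem.Int.toStr cluster) (v ++ [[s]])             -- unreachable
  | none => pvSetKey pop (PySem.Int.toStr cluster) [[s]]                      -- population[key]=[[Step]]

def analysis_subtab (Clusters : List (List Int)) (Step : Int) : List (String × List (List Int)) :=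
  (Clusters.foldl
    (fun st Snapshot => (Snapshot.foldl (fun p c => pvStepA p st.2 c) st.1, st.2 + 1))
    ([], Step)).1

-- ===== PORT B =====
-- segmentation step of _runs: extend the last run iff its last element is x-1
def pvRunsStep (out : List (List Int)) (x : Int) : List (List Int) :=
  match out.getLast? with
  | some r => if r.getLast? = some (x - 1) then out.dropLast ++ [r ++ [x]] else out ++ [[x]]
  | none => [[x]]

def pvRuns (xs : List Int) : List (List Int) := xs.foldl pvRunsStep []

-- pass 1 step: steps.setdefault(str(cluster), []).append(s)
def pvStepB (d : List (String × List Int)) (s : Int) (cluster : Int) : List (String × List Int) :=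
  match d.lookup (PySem.Int.toStr cluster) with
  | some v => pvSetKey d (PySem.Int.toStr cluster) (v ++ [s])
  | none => pvSetKey d (PySem.Int.toStr cluster) [s]

def analysis_subtab_alt (Clusters : List (List Int)) (Step : Int) : List (String × List (List Int)) :=
  ((Clusters.foldl
      (fun st Snapshot => (Snapshot.foldl (fun d c => pvStepB d st.2 c) st.1, st.2 + 1))
      ([], Step)).1).map (fun p => (p.1, pvRuns p.2))

-- ===== PRECONDITION & SPEC =====
def Spec_analysis_subtab (Clusters : List (List Int)) (Step : Int) (out : List (String × List (List Int))) : Prop := out = analysis_subtab_alt Clusters Step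
instance (Clusters : List (List Int)) (Step : Int) (out : List (String × List (List Int))) : Decidable (Spec_analysis_subtab Clusters Step out) := by unfold Spec_analysis_subtab; infer_instance

-- ===== CLAIM (what is proved, stated in full; the proofs are below) =====
def Claim_equal_analysis_subtab : Prop := ∀ (Clusters : List (List Int)) (Step : Int), Dom_analysis_subtab Clusters Step → Spec_analysis_subtab Clusters Step (analysis_subtab Clusters Step)

-- ===== LEMMAS AND PROOFS =====

def pvMapRuns (d : List (String × List Int)) : List (String × List (List Int)) :=
  d.map (fun p => (p.1, pvRuns p.2))

-- every run produced by pvRuns is nonempty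
theorem pvRuns_aux_ne_nil (xs : List Int) (out : List (List Int))
    (h : ∀ r ∈ out, r ≠ []) : ∀ r ∈ xs.foldl pvRunsStep out, r ≠ [] := by
  induction xs generalizing out with
  | nil => simpa using h
  | cons x xs ih =>
    refine ih _ ?_
    intro r hr
    unfold pvRunsStep at hr
    cases hlast : out.getLast? with
    | none => simp [hlast] at hr; simp [hr]
    | some r0 =>
      simp only [hlast] at hr
      split at hr
      · rcases List.mem_append.1 hr with h1 | h1
        · exact h _ (List.dropLast_subset _ h1)
        · simp at h1; simp [h1]
      · rcases List.mem_append.1 hr with h1 | h1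
        · exact h _ h1
        · simp at h1; simp [h1]

theorem pvRunsStep_ne_nil (out : List (List Int)) (x : Int) : pvRunsStep out x ≠ [] := by
  unfold pvRunsStep
  cases hlast : out.getLast? with
  | none => simp
  | some r0 =>
    simp only [hlast]
    split <;> simp

theorem pvRuns_ne_nil (xs : List Int) (hxs : xs ≠ []) : pvRuns xs ≠ [] := by
  rcases List.eq_nil_or_concat xs with h | ⟨ys, y, rfl⟩
  · exact absurd h hxs
  · unfold pvRuns
    rw [List.concat_eq_append, List.foldl_append]
    exact pvRunsStep_ne_nil _ _

-- lookup through pvMapRuns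
theorem lookup_mapRuns (d : List (String × List Int)) (k : String) :
    (pvMapRuns d).lookup k = (d.lookup k).map pvRuns := by
  induction d with
  | nil => rfl
  | cons p rest ih =>
    obtain ⟨k', v⟩ := p
    simp only [pvMapRuns, List.map_cons] at ih ⊢
    by_cases h : k = k'
    · simp [List.lookup, h]
    · have hb : (k == k') = false := by simp [h]
      simp [List.lookup, hb, ih]

-- pvSetKey commutes with pvMapRuns
theorem setKey_mapRuns (d : List (String × List Int)) (k : String) (v : List Int) :
    pvMapRuns (pvSetKey d k v) = pvSetKey (pvMapRuns d) k (pvRuns v) := by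
  induction d with
  | nil => rfl
  | cons p rest ih =>
    obtain ⟨k', w⟩ := p
    by_cases h : k' = k <;> simp [pvMapRuns, pvSetKey, h] at ih ⊢ <;> exact ih

-- a successful lookup yields a member
theorem lookup_mem {V : Type} (d : List (String × V)) (k : String) (v : V)
    (h : d.lookup k = some v) : (k, v) ∈ d := by
  induction d with
  | nil => simp [List.lookup] at h
  | cons p rest ih =>
    obtain ⟨k', w⟩ := p
    by_cases hk : k = k'
    · simp [List.lookup, hk] at h; simp [hk, h]
    · have hb : (k == k') = false := by simp [hk]
      simp only [List.lookup, hb] at h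
      exact List.mem_cons_of_mem _ (ih h)

-- values in B's step dict are nonempty
def pvInv (d : List (String × List Int)) : Prop := ∀ p ∈ d, p.2 ≠ []

theorem pvInv_setKey (d : List (String × List Int)) (k : String) (v : List Int)
    (hd : pvInv d) (hv : v ≠ []) : pvInv (pvSetKey d k v) := by
  induction d with
  | nil => intro p hp; simp [pvSetKey] at hp; simp [hp, hv]
  | cons q rest ih =>
    obtain ⟨k', w⟩ := q
    intro p hp
    unfold pvSetKey at hp
    split at hp
    · rcases List.mem_cons.1 hp with h | h
      · simp [h, hv]
      · exact hd p (List.mem_cons_of_mem _ h)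
    · rcases List.mem_cons.1 hp with h | h
      · exact hd p (by simp [h])
      · exact ih (fun q hq => hd q (List.mem_cons_of_mem _ hq)) p h

theorem pvInv_stepB (d : List (String × List Int)) (s : Int) (c : Int)
    (hd : pvInv d) : pvInv (pvStepB d s c) := by
  unfold pvStepB
  cases h : d.lookup (PySem.Int.toStr c) with
  | some v => simp only [h]; exact pvInv_setKey _ _ _ hd (by simp)
  | none => simp only [h]; exact pvInv_setKey _ _ _ hd (by simp)

-- the core commuting step: one cluster of A on the mapped dict equals mapping B's step
theorem stepA_commute (d : List (String × List Int)) (s : Int) (c : Int) (hd : pvInv d) :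
    pvStepA (pvMapRuns d) s c = pvMapRuns (pvStepB d s c) := by
  unfold pvStepA pvStepB
  rw [lookup_mapRuns]
  cases hlk : d.lookup (PySem.Int.toStr c) with
  | none =>
    simp only [Option.map_none]
    rw [setKey_mapRuns]
    rfl
  | some xs =>
    simp only [Option.map_some]
    have hxs : xs ≠ [] := hd _ (lookup_mem _ _ _ hlk)
    have hR : pvRuns xs ≠ [] := pvRuns_ne_nil xs hxs
    have hRappend : pvRuns (xs ++ [s]) = pvRunsStep (pvRuns xs) s := by
      unfold pvRuns; rw [List.foldl_append]; rfl
    rw [setKey_mapRuns, hRappend]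
    obtain ⟨r, hr⟩ : ∃ r, (pvRuns xs).getLast? = some r := by
      cases h : (pvRuns xs).getLast? with
      | none => exact absurd (List.getLast?_eq_none_iff.1 h) hR
      | some r => exact ⟨r, rfl⟩
    have hrne : r ≠ [] := by
      have hrmem : r ∈ pvRuns xs := List.mem_of_getLast? hr
      exact pvRuns_aux_ne_nil xs [] (by simp) r hrmem
    obtain ⟨l, hl⟩ : ∃ l, r.getLast? = some l := by
      cases h : r.getLast? with
      | none => exact absurd (List.getLast?_eq_none_iff.1 h) hrne
      | some l => exact ⟨l, rfl⟩
    simp only [hr, hl]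
    unfold pvRunsStep
    rw [hr]
    by_cases hc : l = s - 1
    · simp [hl, hc]
    · simp [hl, hc]

-- inner fold (one snapshot) commutes
theorem snap_commute (Snapshot : List Int) (d : List (String × List Int)) (s : Int)
    (hd : pvInv d) :
    Snapshot.foldl (fun p c => pvStepA p s c) (pvMapRuns d)
      = pvMapRuns (Snapshot.foldl (fun p c => pvStepB p s c) d) := by
  induction Snapshot generalizing d with
  | nil => rfl
  | cons c cs ih =>
    simp only [List.foldl_cons]
    rw [stepA_commute d s c hd]
    exact ih _ (pvInv_stepB d s c hd)

theorem pvInv_snap (Snapshot : List Int) (d : List (String × List Int)) (s : Int)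
    (hd : pvInv d) : pvInv (Snapshot.foldl (fun p c => pvStepB p s c) d) := by
  induction Snapshot generalizing d with
  | nil => exact hd
  | cons c cs ih => exact ih _ (pvInv_stepB d s c hd)

-- outer fold commutes
theorem outer_commute (Clusters : List (List Int)) (d : List (String × List Int)) (s : Int)
    (hd : pvInv d) :
    (Clusters.foldl
      (fun st Snapshot => (Snapshot.foldl (fun p c => pvStepA p st.2 c) st.1, st.2 + 1))
      (pvMapRuns d, s)).1
    = pvMapRuns ((Clusters.foldl
        (fun st Snapshot => (Snapshot.foldl (fun p c => pvStepB p st.2 c) st.1, st.2 + 1))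
        (d, s)).1) := by
  induction Clusters generalizing d s with
  | nil => rfl
  | cons Snap rest ih =>
    simp only [List.foldl_cons]
    rw [snap_commute Snap d s hd]
    exact ih _ _ (pvInv_snap Snap d s hd)

-- ===== VERDICT (by name: the statement is the Claim_ definition above) =====
theorem analysis_subtab_spec : Claim_equal_analysis_subtab := by
  intro Clusters Step _
  unfold Spec_analysis_subtab analysis_subtab analysis_subtab_alt
  have h := outer_commute Clusters [] Step (by intro p hp; simp at hp)
  simpa [pvMapRuns] using h
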